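-- pv_equiv track=rewrite | github.com/Luiz-Henrique28/lista-complexidade | Computabilidade-e-Complexidade-de-Algoritmos-main/python/3.py | afd_exatamente_dois_uns
-- ===== SOURCE A (Python) =====
-- def afd_exatamente_dois_uns(s):
--     estado = 'q0'
--     for char in s:
--         if estado == 'q0':
--             if char == '1':
--                 estado = 'q1'
--         elif estado == 'q1':
--             if char == '1':
--                 estado = 'q2'
--         elif estado == 'q2':
--             if char == '1':
--                 estado = 'q3'
--         if estado == 'q3':
--             break  # Mais de dois '1's, rejeita
--     return estado == 'q2'
-- ===== SOURCE B (Python) =====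
-- def afd_exatamente_dois_uns(s):
--     return s.count('1') == 2
-- ===== Notes on version B (the rewrite author's own statement) =====
-- stated objective: simpler
-- what changed: Replaces the explicit four-state DFA loop with early break by a single aggregate tally of the character one via str.count compared to 2.
import Mathlib
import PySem

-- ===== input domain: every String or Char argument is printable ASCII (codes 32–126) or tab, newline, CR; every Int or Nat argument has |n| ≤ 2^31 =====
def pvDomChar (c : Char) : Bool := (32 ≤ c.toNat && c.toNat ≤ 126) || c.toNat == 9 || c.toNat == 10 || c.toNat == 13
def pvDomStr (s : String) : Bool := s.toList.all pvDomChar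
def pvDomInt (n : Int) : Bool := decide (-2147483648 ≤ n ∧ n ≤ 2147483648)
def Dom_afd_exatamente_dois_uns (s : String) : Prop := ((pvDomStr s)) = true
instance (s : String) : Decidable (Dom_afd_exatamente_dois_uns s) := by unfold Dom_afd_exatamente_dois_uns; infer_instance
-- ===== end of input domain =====

-- B replaces the explicit DFA state machine by a direct count of '1' characters (simpler).

-- ===== PORT A =====
-- the DFA loop over the characters; 'break' on reaching 'q3' is the early return of the state
def pvLoopA : List Char → String → String
  | [], st => st
  | c :: rest, st =>
    let st' :=
      if st == "q0" then (if c == '1' then "q1" else st)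
      else if st == "q1" then (if c == '1' then "q2" else st)
      else if st == "q2" then (if c == '1' then "q3" else st)
      else st
    if st' == "q3" then st' else pvLoopA rest st'

def afd_exatamente_dois_uns (s : String) : Bool :=
  pvLoopA s.toList "q0" == "q2"

-- ===== PORT B =====
def afd_exatamente_dois_uns_alt (s : String) : Bool :=
  PySem.Str.count s "1" == 2

-- ===== PRECONDITION & SPEC =====
def Spec_afd_exatamente_dois_uns (s : String) (out : Bool) : Prop := out = afd_exatamente_dois_uns_alt s
instance (s : String) (out : Bool) : Decidable (Spec_afd_exatamente_dois_uns s out) := by unfold Spec_afd_exatamente_dois_uns; infer_instance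

-- ===== CLAIM (what is proved, stated in full; the proofs are below) =====
def Claim_equal_afd_exatamente_dois_uns : Prop := ∀ (s : String), Dom_afd_exatamente_dois_uns s → Spec_afd_exatamente_dois_uns s (afd_exatamente_dois_uns s)

-- ===== LEMMAS AND PROOFS =====

-- the DFA from each live state accepts iff the remaining '1'-count is exactly what that state still needs
theorem pvLoopA_char :
    ∀ (l : List Char),
      ((pvLoopA l "q0" == "q2") = decide (l.count '1' = 2)) ∧
      ((pvLoopA l "q1" == "q2") = decide (l.count '1' = 1)) ∧
      ((pvLoopA l "q2" == "q2") = decide (l.count '1' = 0)) := by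
  intro l
  induction l with
  | nil => simp [pvLoopA]
  | cons c rest ih =>
    obtain ⟨h0, h1, h2⟩ := ih
    by_cases hc : c = '1' <;>
      simp [pvLoopA, hc, h0, h1, h2]

-- Python str.count of a single character equals the List.count of that character
theorem countGo_single (c : Char) :
    ∀ (cs : List Char) (fuel acc : Nat), cs.length ≤ fuel →
      PySem.Chars.count.go [c] fuel cs acc = acc + cs.count c := by
  intro cs
  induction cs with
  | nil =>
    intro fuel acc _
    cases fuel <;> simp [PySem.Chars.count.go]
  | cons d t ih =>
    intro fuel acc h
    cases fuel with
    | zero => simp at h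
    | succ f =>
      have hf : t.length ≤ f := by simpa using h
      by_cases hd : d = c
      · simp [PySem.Chars.count.go, List.isPrefixOf, hd, ih _ _ hf]
        omega
      · simp [PySem.Chars.count.go, List.isPrefixOf, hd, ih _ _ hf]
        exact fun h' => hd h'.symm

theorem strCount_one (s : String) : PySem.Str.count s "1" = s.toList.count '1' := by
  simp [PySem.Str.count_eq, PySem.Chars.count]
  simpa using countGo_single '1' s.toList s.length 0 (by simp)

-- ===== VERDICT (by name: the statement is the Claim_ definition above) =====
theorem afd_exatamente_dois_uns_spec : Claim_equal_afd_exatamente_dois_uns := by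
  intro s _
  unfold Spec_afd_exatamente_dois_uns afd_exatamente_dois_uns afd_exatamente_dois_uns_alt
  rw [strCount_one]
  rw [(pvLoopA_char s.toList).1]
  by_cases h : s.toList.count '1' = 2 <;> simp [h]
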